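-- pv_equiv track=rewrite | github.com/se-buw/alloy-metrics | analysis/edit_paths.py | calculate_unsat_to_sat_steps
-- ===== SOURCE A (Python) =====
-- def calculate_unsat_to_sat_steps(status_chain):
--     steps = []
--     i = 0
--     while i < len(status_chain):
--         if status_chain[i] == "UNSAT":
--             # Skip to the last consecutive UNSAT
--             while i + 1 < len(status_chain) and status_chain[i + 1] == "UNSAT":
--                 i += 1
--             # Find the next SAT
--             for j in range(i + 1, len(status_chain)):
--                 if status_chain[j] == "SAT":
--                     steps.append(j - i)
--                     break
--         i += 1
--     return steps
-- ===== SOURCE B (Python) =====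
-- def calculate_unsat_to_sat_steps(status_chain):
--     n = len(status_chain)
--     # backward pass: next_sat[i] = index of nearest "SAT" strictly after i (or None)
--     next_sat = [None] * n
--     nxt = None
--     for i in range(n - 1, -1, -1):
--         next_sat[i] = nxt
--         if status_chain[i] == "SAT":
--             nxt = i
--     # forward scan: one step per position, emit at the end of each UNSAT run
--     steps = []
--     for i in range(n):
--         if (status_chain[i] == "UNSAT"
--                 and (i + 1 == n or status_chain[i + 1] != "UNSAT")
--                 and next_sat[i] is not None):
--             steps.append(next_sat[i] - i)
--     return steps
-- ===== Notes on version B (the rewrite author's own statement) =====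
-- stated objective: alternative
-- what changed: Replaced A's per-run forward search for the next SAT (nested scans, worst-case quadratic) by a backward pass precomputing the nearest-SAT index after each position plus a single forward scan emitting at each UNSAT-run end; O(n) worst case, measured ~1.3x on the benchmark inputs (below the 1.5x bar, so not labelled faster).
import Mathlib
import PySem

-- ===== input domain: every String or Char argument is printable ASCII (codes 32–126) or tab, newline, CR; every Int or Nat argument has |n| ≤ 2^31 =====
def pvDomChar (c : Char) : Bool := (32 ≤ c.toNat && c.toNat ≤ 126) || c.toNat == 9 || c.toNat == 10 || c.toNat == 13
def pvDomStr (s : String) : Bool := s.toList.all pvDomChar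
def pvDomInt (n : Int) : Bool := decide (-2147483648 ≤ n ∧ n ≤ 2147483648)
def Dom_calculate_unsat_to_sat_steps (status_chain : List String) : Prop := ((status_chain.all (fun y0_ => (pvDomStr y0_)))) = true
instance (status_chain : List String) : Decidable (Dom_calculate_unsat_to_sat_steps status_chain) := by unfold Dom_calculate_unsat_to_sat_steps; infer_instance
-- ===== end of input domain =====

-- B replaces A's nested per-run forward search for the next "SAT" by a backward pass
-- precomputing, for every position, the nearest "SAT" index after it, then one forward scan.

-- ===== PORT A =====
-- inner while loop: advance i while the NEXT element is "UNSAT" (all accesses are bounds-guarded,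
-- so List.getD is exact for Python's s[i])
def skipA (s : List String) (i : Nat) : Nat :=
  if h : i + 1 < s.length ∧ s.getD (i + 1) "" = "UNSAT" then skipA s (i + 1) else i
termination_by s.length - i
decreasing_by omega

-- inner for loop: first index j ≥ start with s[j] = "SAT" (none = loop falls through)
def findA (s : List String) (j : Nat) : Option Nat :=
  if h : j < s.length then
    if s.getD j "" = "SAT" then some j else findA s (j + 1)
  else none
termination_by s.length - j

-- the outer while loop needs i ≤ skipA s i for termination
theorem skipA_ge (s : List String) (i : Nat) : i ≤ skipA s i := by
  unfold skipA
  split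
  · exact Nat.le_trans (Nat.le_succ i) (skipA_ge s (i + 1))
  · exact Nat.le_refl i
termination_by s.length - i
decreasing_by omega

def loopA (s : List String) (i : Nat) (steps : List Int) : List Int :=
  if h : i < s.length then
    if s.getD i "" = "UNSAT" then
      let i' := skipA s i
      loopA s (i' + 1)
        (match findA s (i' + 1) with
         | some j => steps ++ [(j : Int) - (i' : Int)]
         | none => steps)
    else loopA s (i + 1) steps
  else steps
termination_by s.length - i
decreasing_by
  · have := skipA_ge s i; omega
  · omega

def calculate_unsat_to_sat_steps (status_chain : List String) : List Int :=
  loopA status_chain 0 []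

-- ===== PORT B =====
-- backward pass: for each position the nearest "SAT" index strictly after it,
-- returned together with the nearest "SAT" index in the whole suffix (the running `nxt`)
def buildB (s : List String) (base : Nat) : List (Option Nat) × Option Nat :=
  match s with
  | [] => ([], none)
  | x :: xs =>
    let r := buildB xs (base + 1)
    (r.2 :: r.1, if x = "SAT" then some base else r.2)

-- forward scan: emit next_sat[i] - i at the last element of each UNSAT run
def scanB (s : List String) (ns : List (Option Nat)) (i : Nat) : List Int :=
  match s, ns with
  | x :: xs, o :: os =>
    if x = "UNSAT" ∧ xs.head? ≠ some "UNSAT" then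
      match o with
      | some j => ((j : Int) - (i : Int)) :: scanB xs os (i + 1)
      | none => scanB xs os (i + 1)
    else scanB xs os (i + 1)
  | _, _ => []

def calculate_unsat_to_sat_steps_alt (status_chain : List String) : List Int :=
  scanB status_chain (buildB status_chain 0).1 0

-- ===== PRECONDITION & SPEC =====
def Spec_calculate_unsat_to_sat_steps (status_chain : List String) (out : List Int) : Prop := out = calculate_unsat_to_sat_steps_alt status_chain
instance (status_chain : List String) (out : List Int) : Decidable (Spec_calculate_unsat_to_sat_steps status_chain out) := by unfold Spec_calculate_unsat_to_sat_steps; infer_instance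

-- ===== CLAIM (what is proved, stated in full; the proofs are below) =====
def Claim_equal_calculate_unsat_to_sat_steps : Prop := ∀ (status_chain : List String), Dom_calculate_unsat_to_sat_steps status_chain → Spec_calculate_unsat_to_sat_steps status_chain (calculate_unsat_to_sat_steps status_chain)

-- ===== LEMMAS AND PROOFS =====

-- reference function: nearest "SAT" index in s, positions numbered from base
def nearestSAT (s : List String) (base : Nat) : Option Nat :=
  match s with
  | [] => none
  | x :: xs => if x = "SAT" then some base else nearestSAT xs (base + 1)

theorem buildB_snd (s : List String) (base : Nat) : (buildB s base).2 = nearestSAT s base := by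
  induction s generalizing base with
  | nil => rfl
  | cons x xs ih => simp [buildB, nearestSAT, ih]

theorem buildB_fst_cons (x : String) (xs : List String) (base : Nat) :
    (buildB (x :: xs) base).1 = nearestSAT xs (base + 1) :: (buildB xs (base + 1)).1 := by
  simp [buildB, buildB_snd]

theorem scanB_cons (x : String) (xs : List String) (o : Option Nat) (os : List (Option Nat)) (i : Nat) :
    scanB (x :: xs) (o :: os) i =
      if x = "UNSAT" ∧ xs.head? ≠ some "UNSAT" then
        (match o with
         | some j => ((j : Int) - (i : Int)) :: scanB xs os (i + 1)
         | none => scanB xs os (i + 1))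
      else scanB xs os (i + 1) := rfl

theorem scanB_nil (ns : List (Option Nat)) (i : Nat) : scanB [] ns i = [] := rfl

theorem findA_eq_nearest (s : List String) (j : Nat) :
    findA s j = nearestSAT (s.drop j) j := by
  unfold findA
  split
  · next h =>
    rw [List.drop_eq_getElem_cons h, List.getD_eq_getElem s "" h]
    simp only [nearestSAT]
    rw [findA_eq_nearest s (j + 1)]
  · next h =>
    rw [List.drop_eq_nil_of_le (by omega)]
    rfl
termination_by s.length - j

theorem skipA_pos (s : List String) (i : Nat)
    (h : i + 1 < s.length ∧ s.getD (i + 1) "" = "UNSAT") : skipA s i = skipA s (i + 1) := by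
  rw [skipA, dif_pos h]

theorem skipA_neg (s : List String) (i : Nat)
    (h : ¬(i + 1 < s.length ∧ s.getD (i + 1) "" = "UNSAT")) : skipA s i = i := by
  rw [skipA, dif_neg h]

-- one UNSAT run: scanB walks through it emitting nothing until the run's last element
theorem scan_run (s : List String) (i : Nat) (hi : i < s.length) (hU : s.getD i "" = "UNSAT") :
    scanB (s.drop i) ((buildB (s.drop i) i).1) i =
      (match nearestSAT (s.drop (skipA s i + 1)) (skipA s i + 1) with
       | some j => [(j : Int) - ((skipA s i : Nat) : Int)]
       | none => []) ++
      scanB (s.drop (skipA s i + 1)) ((buildB (s.drop (skipA s i + 1)) (skipA s i + 1)).1) (skipA s i + 1) := by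
  by_cases h : i + 1 < s.length ∧ s.getD (i + 1) "" = "UNSAT"
  · -- the next element is also "UNSAT": i is not a run end, keep scanning
    rw [skipA_pos s i h, List.drop_eq_getElem_cons hi, buildB_fst_cons, scanB_cons]
    have hhd : (s.drop (i + 1)).head? = some "UNSAT" := by
      rw [List.drop_eq_getElem_cons h.1]
      simp only [List.head?_cons, Option.some.injEq]
      rw [← List.getD_eq_getElem s "" h.1]
      exact h.2
    rw [if_neg (fun hc => hc.2 hhd)]
    exact scan_run s (i + 1) h.1 h.2
  · -- run ends at i
    rw [skipA_neg s i h, List.drop_eq_getElem_cons hi, buildB_fst_cons, scanB_cons]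
    have hx : s[i] = "UNSAT" := by rw [← List.getD_eq_getElem s "" hi]; exact hU
    have hhd : (s.drop (i + 1)).head? ≠ some "UNSAT" := by
      by_cases h1 : i + 1 < s.length
      · rw [List.drop_eq_getElem_cons h1]
        simp only [List.head?_cons, ne_eq, Option.some.injEq]
        rw [← List.getD_eq_getElem s "" h1]
        exact fun he => h ⟨h1, he⟩
      · rw [List.drop_eq_nil_of_le (by omega)]; simp
    rw [if_pos ⟨hx, hhd⟩]
    cases hn : nearestSAT (s.drop (i + 1)) (i + 1) <;> simp
termination_by s.length - i
decreasing_by omega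

theorem loopA_eq (s : List String) (i : Nat) (acc : List Int) :
    loopA s i acc = acc ++ scanB (s.drop i) ((buildB (s.drop i) i).1) i := by
  rw [loopA]
  split
  · next hi =>
    split
    · next hU =>
      rw [scan_run s i hi hU, ← findA_eq_nearest s (skipA s i + 1)]
      rw [loopA_eq s (skipA s i + 1)]
      cases h : findA s (skipA s i + 1) <;> simp
    · next hU =>
      rw [List.drop_eq_getElem_cons hi, buildB_fst_cons, scanB_cons]
      have hx : ¬(s[i] = "UNSAT" ∧ (s.drop (i + 1)).head? ≠ some "UNSAT") := by
        intro hc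
        exact hU (by rw [List.getD_eq_getElem s "" hi]; exact hc.1)
      rw [if_neg hx]
      exact loopA_eq s (i + 1) acc
  · next hi =>
    rw [List.drop_eq_nil_of_le (by omega), scanB_nil]
    simp
termination_by s.length - i
decreasing_by all_goals (have := skipA_ge s i; omega)

-- ===== VERDICT (by name: the statement is the Claim_ definition above) =====
theorem calculate_unsat_to_sat_steps_spec : Claim_equal_calculate_unsat_to_sat_steps := by
  intro s _
  unfold Spec_calculate_unsat_to_sat_steps calculate_unsat_to_sat_steps calculate_unsat_to_sat_steps_alt
  simpa using loopA_eq s 0 []
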